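-- pv_equiv track=rewrite | github.com/usefmourad/BSc-Thesis | LWPaper.py | semiJoin
-- ===== SOURCE A (Python) =====
-- def semiJoin(R, S):
--     commonAttributes = None
--     if R and S:
--         commonAttributes = R[0].keys() & S[0].keys()
--     else:
--         return []
--     result = []
--     for tupleR in R:
--         for tupleS in S:
--             if all(tupleR.get(key) == tupleS.get(key) for key in commonAttributes):
--                 newTuple = {}
--                 newTuple.update(tupleR)
--                 result.append(newTuple)
--     return result
-- ===== SOURCE B (Python) =====
-- def semiJoin(R, S):
--     if not (R and S):
--         return []
--     common = [k for k in R[0] if k in S[0]]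
--     counts = {}
--     for s in S:
--         key = tuple(s.get(k) for k in common)
--         counts[key] = counts.get(key, 0) + 1
--     out = []
--     for r in R:
--         out.extend([dict(r)] * counts.get(tuple(r.get(k) for k in common), 0))
--     return out
-- ===== Notes on version B (the rewrite author's own statement) =====
-- stated objective: faster
-- what changed: Instead of A's nested loop comparing every R-tuple with every S-tuple, B builds a hash index (dict of counts) of S keyed by the tuple of common-attribute values in one pass, then emits each R-tuple repeated by a single O(1) lookup.
import Mathlib
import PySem

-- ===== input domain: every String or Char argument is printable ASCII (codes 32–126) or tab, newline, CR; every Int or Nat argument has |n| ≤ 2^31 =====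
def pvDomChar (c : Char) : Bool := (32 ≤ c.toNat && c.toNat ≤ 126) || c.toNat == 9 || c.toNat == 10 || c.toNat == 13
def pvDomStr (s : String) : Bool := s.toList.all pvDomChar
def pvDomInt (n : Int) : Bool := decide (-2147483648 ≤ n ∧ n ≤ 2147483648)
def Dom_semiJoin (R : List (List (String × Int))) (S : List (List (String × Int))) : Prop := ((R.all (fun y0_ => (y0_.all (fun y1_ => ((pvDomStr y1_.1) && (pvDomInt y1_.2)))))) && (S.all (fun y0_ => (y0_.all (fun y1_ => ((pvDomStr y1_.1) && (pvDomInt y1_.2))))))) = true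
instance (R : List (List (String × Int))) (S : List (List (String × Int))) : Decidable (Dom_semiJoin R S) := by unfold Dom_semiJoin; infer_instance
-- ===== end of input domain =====

-- B replaces A's nested O(|R|*|S|) scan by a one-pass count index of S keyed by the
-- common-attribute value tuple, then one pass over R (return value only; no mutation).

-- dict.get(key) on an association list (first match = the dict's unique binding)
def pvGet (t : List (String × Int)) (k : String) : Option Int :=
  (t.find? (fun p => p.1 == k)).map (·.2)

-- 'newTuple = {}; newTuple.update(tupleR)' / 'dict(r)': a fresh dict built from the pairs
def pvCopy (t : List (String × Int)) : List (String × Int) :=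
  (t.foldl (fun d p => PySem.Dict.insert d p.1 p.2) PySem.Dict.empty).items

-- ===== PORT A =====
def semiJoin (R : List (List (String × Int))) (S : List (List (String × Int))) : List (List (String × Int)) :=
  match R, S with
  | r0 :: _, s0 :: _ =>
    -- commonAttributes = R[0].keys() & S[0].keys()  (set; used only order-independently via all(...))
    let common := PySem.Set.inter (PySem.Set.ofList (r0.map (·.1))) (PySem.Set.ofList (s0.map (·.1)))
    R.foldl (fun result tr =>
      S.foldl (fun result ts =>
        if common.all (fun k => pvGet tr k == pvGet ts k) then result ++ [pvCopy tr]
        else result) result) []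
  | _, _ => []

-- ===== PORT B =====
def semiJoin_alt (R : List (List (String × Int))) (S : List (List (String × Int))) : List (List (String × Int)) :=
  match R with
  | [] => []
  | r0 :: _ =>
   match S with
   | [] => []
   | s0 :: _ =>
    -- common = [k for k in R[0] if k in S[0]]
    let common := (r0.map (·.1)).filter (fun k => (s0.map (·.1)).contains k)
    -- counts[key] = counts.get(key, 0) + 1 over S, key = tuple(s.get(k) for k in common)
    let counts := S.foldl (fun d s =>
      PySem.Dict.insert d (common.map (fun k => pvGet s k))
        (PySem.Dict.getD d (common.map (fun k => pvGet s k)) 0 + 1))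
      (PySem.Dict.empty : PySem.Dict (List (Option Int)) Int)
    -- out.extend([dict(r)] * counts.get(key_r, 0)) over R
    R.foldl (fun out r =>
      out ++ List.replicate (PySem.Dict.getD counts (common.map (fun k => pvGet r k)) 0).toNat (pvCopy r)) []

-- ===== PRECONDITION & SPEC =====
def Spec_semiJoin (R : List (List (String × Int))) (S : List (List (String × Int))) (out : List (List (String × Int))) : Prop := out = semiJoin_alt R S
instance (R : List (List (String × Int))) (S : List (List (String × Int))) (out : List (List (String × Int))) : Decidable (Spec_semiJoin R S out) := by unfold Spec_semiJoin; infer_instance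

-- ===== CLAIM (what is proved, stated in full; the proofs are below) =====
def Claim_equal_semiJoin : Prop := ∀ (R : List (List (String × Int))) (S : List (List (String × Int))), Dom_semiJoin R S → Spec_semiJoin R S (semiJoin R S)

-- ===== LEMMAS AND PROOFS =====

-- A's match test over the common attributes equals equality of the value tuples B keys on
lemma pv_pred_eq (r0 s0 tr ts : List (String × Int)) :
    ((PySem.Set.inter (PySem.Set.ofList (r0.map (·.1))) (PySem.Set.ofList (s0.map (·.1)))).all
        (fun k => pvGet tr k == pvGet ts k) = true)
    ↔ (((r0.map (·.1)).filter (fun k => (s0.map (·.1)).contains k)).map (fun k => pvGet ts k)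
        = ((r0.map (·.1)).filter (fun k => (s0.map (·.1)).contains k)).map (fun k => pvGet tr k)) := by
  rw [List.all_eq_true, List.map_inj_left]
  constructor
  · intro h k hk
    rw [List.mem_filter] at hk
    have := h k (by
      have : k ∈ PySem.Set.inter (PySem.Set.ofList (r0.map (·.1))) (PySem.Set.ofList (s0.map (·.1))) := by
        rw [PySem.Set.mem_inter, PySem.Set.mem_ofList, PySem.Set.mem_ofList]
        exact ⟨hk.1, by simpa using hk.2⟩
      exact this)
    exact (beq_iff_eq.mp this).symm
  · intro h k hk
    rw [PySem.Set.mem_inter, PySem.Set.mem_ofList, PySem.Set.mem_ofList] at hk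
    have := h k (by rw [List.mem_filter]; exact ⟨hk.1, by simpa using hk.2⟩)
    exact beq_iff_eq.mpr this.symm

-- ===== VERDICT (by name: the statement is the Claim_ definition above) =====
theorem semiJoin_spec : Claim_equal_semiJoin := by
  intro R S _
  unfold Spec_semiJoin semiJoin semiJoin_alt
  match R, S with
  | [], _ => rfl
  | _ :: _, [] => rfl
  | r0 :: R', s0 :: S' =>
    simp only
    set common := (r0.map (·.1)).filter (fun k => (s0.map (·.1)).contains k) with hc
    set keyB := fun t => common.map (fun k => pvGet t k) with hkB
    -- the count index of B is Counter(map keyB S)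
    have hcounts : (s0 :: S').foldl (fun d s => PySem.Dict.insert d (keyB s) (PySem.Dict.getD d (keyB s) 0 + 1)) PySem.Dict.empty
        = PySem.Dict.counter ((s0 :: S').map keyB) := by
      rw [← PySem.Dict.foldl_insert_getD_add_one_eq_counter, List.foldl_map]
    rw [hcounts]
    -- both sides are a fold over R appending blocks; show the blocks are equal
    apply PySem.List.foldl_congr_mem
    intro acc tr _
    rw [PySem.List.foldl_append_if]
    have hrep : ((s0 :: S').filter fun ts =>
        (PySem.Set.inter (PySem.Set.ofList (r0.map (·.1))) (PySem.Set.ofList (s0.map (·.1)))).all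
          (fun k => pvGet tr k == pvGet ts k)).map (fun _ => pvCopy tr)
        = List.replicate ((s0 :: S').countP fun ts =>
            (PySem.Set.inter (PySem.Set.ofList (r0.map (·.1))) (PySem.Set.ofList (s0.map (·.1)))).all
              (fun k => pvGet tr k == pvGet ts k)) (pvCopy tr) := by
      rw [List.map_const', List.countP_eq_length_filter]
    rw [hrep]
    congr 1
    -- B's count via the Counter equals A's countP over S
    rw [PySem.Dict.getD_counter, Int.toNat_natCast, List.count_eq_countP, List.countP_map]
    congr 1
    apply List.countP_congr
    intro ts _
    simp only [Function.comp_apply, beq_iff_eq]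
    exact pv_pred_eq r0 s0 tr ts
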